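-- pv_equiv track=rewrite | github.com/tataro212/fenix | pymupdf_yolo_processor.py | _reconstruct_hyphenated_text
-- ===== SOURCE A (Python) =====
-- def _reconstruct_hyphenated_text(blocks: list) -> list:
--     """
--     Intelligently reconstructs paragraphs from raw text blocks, correcting
--     for words that are hyphenated across line breaks.
--     """
--     if not blocks:
--         return []
--
--     reconstructed_texts = []
--     # Start with the text from the first block.
--     current_text = blocks[0].get('original_text', '')
--
--     # Iterate up to the second-to-last block to allow look-ahead.
--     for i in range(len(blocks) - 1):
--         cleaned_text = current_text.strip()
--         # Check if the current, cleaned text ends with a hyphen.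
--         if cleaned_text.endswith('-'):
--             # Look ahead to the next block's text.
--             next_block_text = blocks[i+1].get('original_text', '')
--             # Merge: remove the hyphen and append the next block's text.
--             current_text = cleaned_text[:-1] + next_block_text
--         else:
--             # No hyphen found. Finalize the current text block.
--             # Replace internal newlines with spaces and strip whitespace.
--             reconstructed_texts.append(current_text.replace('\n', ' ').strip())
--             # Start the next block.
--             current_text = blocks[i+1].get('original_text', '')
--
--     # Append the final text block after the loop finishes.
--     reconstructed_texts.append(current_text.replace('\n', ' ').strip())
--
--     # Return a list of dictionaries, ensuring no empty text elements are included.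
--     return [{'original_text': text} for text in reconstructed_texts if text]
-- ===== SOURCE B (Python) =====
-- def _reconstruct_hyphenated_text(blocks: list) -> list:
--     # Two-level grouping decomposition: extract all texts once, then an outer
--     # loop emits one finalized group per iteration while an inner helper
--     # consumes an entire hyphen-merged group at a time.
--     texts = [b.get('original_text', '') for b in blocks]
--
--     def take_group(i):
--         # Consume texts[i], then keep absorbing following texts while the
--         # accumulated text (stripped) ends with a hyphen.
--         acc = texts[i]
--         i += 1
--         while i < len(texts):
--             s = acc.strip()
--             if not s.endswith('-'):
--                 break
--             acc = s[:-1] + texts[i]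
--             i += 1
--         return acc, i
--
--     out = []
--     i = 0
--     while i < len(texts):
--         g, i = take_group(i)
--         t = g.replace('\n', ' ').strip()
--         if t:
--             out.append({'original_text': t})
--     return out
-- ===== Notes on version B (the rewrite author's own statement) =====
-- stated objective: alternative
-- what changed: Replaced A's flat look-ahead loop over range(len-1) with a current_text register by a two-level grouping decomposition: texts are extracted once, an inner helper consumes one entire hyphen-merged group and returns the next index, and an outer loop emits each finalized non-empty group.
import Mathlib
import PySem

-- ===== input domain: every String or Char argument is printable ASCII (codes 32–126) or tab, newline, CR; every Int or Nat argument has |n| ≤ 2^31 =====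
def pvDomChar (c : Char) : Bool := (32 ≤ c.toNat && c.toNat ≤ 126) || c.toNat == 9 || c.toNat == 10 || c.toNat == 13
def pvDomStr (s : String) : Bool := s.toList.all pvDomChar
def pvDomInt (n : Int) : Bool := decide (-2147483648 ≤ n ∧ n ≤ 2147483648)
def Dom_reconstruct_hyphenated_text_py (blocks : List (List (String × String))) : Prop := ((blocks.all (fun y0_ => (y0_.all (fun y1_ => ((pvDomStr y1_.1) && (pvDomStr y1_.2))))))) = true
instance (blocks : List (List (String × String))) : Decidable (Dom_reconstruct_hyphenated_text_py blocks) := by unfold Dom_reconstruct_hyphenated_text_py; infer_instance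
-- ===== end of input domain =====

-- B replaces A's flat look-ahead loop by a two-level grouping decomposition
-- (inner helper consumes one whole hyphen-merged group; outer loop emits
-- finalized groups); objective: alternative, same cost.


-- ===== PORT A =====
-- literal port of A: look-ahead loop over range(len(blocks)-1), state = (reconstructed_texts, current_text)
def reconstruct_hyphenated_text_py (blocks : List (List (String × String))) : List (List (String × String)) :=
  if blocks.isEmpty then []
  else
    let current0 : String := (PySem.Dict.mk (PySem.List.pyGetD blocks 0 [])).getD "original_text" ""
    let st :=
      (PySem.List.pyRange 0 (PySem.List.len blocks - 1) 1).foldl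
        (fun (st : List String × String) (i : Int) =>
          let cleaned := PySem.Str.strip st.2
          if PySem.Str.endswith cleaned "-" then
            (st.1,
             PySem.Str.slice cleaned none (some (-1)) ++
               (PySem.Dict.mk (PySem.List.pyGetD blocks (i + 1) [])).getD "original_text" "")
          else
            (st.1 ++ [PySem.Str.strip (PySem.Str.replace st.2 "\n" " ")],
             (PySem.Dict.mk (PySem.List.pyGetD blocks (i + 1) [])).getD "original_text" ""))
        ([], current0)
    let texts := st.1 ++ [PySem.Str.strip (PySem.Str.replace st.2 "\n" " ")]
    (texts.filter (fun t => t != "")).map (fun t => [("original_text", t)])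

-- ===== PORT B =====
-- B's inner helper take_group: absorb following texts while the accumulated
-- text (stripped) ends with '-'; the advancing index i is the list suffix here
def pvTakeGroup (acc : String) (ts : List String) : String × List String :=
  match ts with
  | [] => (acc, [])
  | t :: rest =>
    let s := PySem.Str.strip acc
    if PySem.Str.endswith s "-" then
      pvTakeGroup (PySem.Str.slice s none (some (-1)) ++ t) rest
    else (acc, t :: rest)

-- termination measure for B's outer loop (cited by pvEmitGroups's decreasing_by)
theorem pvTakeGroup_len : ∀ (ts : List String) (acc : String), (pvTakeGroup acc ts).2.length ≤ ts.length := by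
  intro ts
  induction ts with
  | nil => intro acc; simp [pvTakeGroup]
  | cons t rest ih =>
    intro acc
    by_cases h : PySem.Chars.endswith (PySem.Chars.strip acc.toList) ['-'] = true
    · rw [show pvTakeGroup acc (t :: rest)
          = pvTakeGroup (PySem.Str.slice (PySem.Str.strip acc) none (some (-1)) ++ t) rest
        from by rw [pvTakeGroup]; simp [h]]
      exact Nat.le_succ_of_le (ih _)
    · rw [show pvTakeGroup acc (t :: rest) = (acc, t :: rest) from by rw [pvTakeGroup]; simp [h]]

-- B's outer while loop: emit one finalized non-empty group per iteration
def pvEmitGroups : List String → List (List (String × String))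
  | [] => []
  | t :: rest =>
    let r := pvTakeGroup t rest
    let fin := PySem.Str.strip (PySem.Str.replace r.1 "\n" " ")
    (if fin ≠ "" then [[("original_text", fin)]] else []) ++ pvEmitGroups r.2
termination_by ts => ts.length
decreasing_by exact Nat.lt_succ_of_le (pvTakeGroup_len rest t)

-- literal port of B: extract the texts once, then the grouping loop
def reconstruct_hyphenated_text_py_alt (blocks : List (List (String × String))) : List (List (String × String)) :=
  pvEmitGroups (blocks.map (fun b => (PySem.Dict.mk b).getD "original_text" ""))

-- ===== PRECONDITION & SPEC =====
def Spec_reconstruct_hyphenated_text_py (blocks : List (List (String × String))) (out : List (List (String × String))) : Prop := out = reconstruct_hyphenated_text_py_alt blocks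
instance (blocks : List (List (String × String))) (out : List (List (String × String))) : Decidable (Spec_reconstruct_hyphenated_text_py blocks out) := by unfold Spec_reconstruct_hyphenated_text_py; infer_instance

-- ===== CLAIM (what is proved, stated in full; the proofs are below) =====
def Claim_equal_reconstruct_hyphenated_text_py : Prop := ∀ (blocks : List (List (String × String))), Dom_reconstruct_hyphenated_text_py blocks → Spec_reconstruct_hyphenated_text_py blocks (reconstruct_hyphenated_text_py blocks)

-- ===== LEMMAS AND PROOFS =====

-- A's loop step over a text (the fold body after the index has been resolved)
def pvStepT (st : List String × String) (t : String) : List String × String :=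
  let cleaned := PySem.Str.strip st.2
  if PySem.Str.endswith cleaned "-" then
    (st.1, PySem.Str.slice cleaned none (some (-1)) ++ t)
  else
    (st.1 ++ [PySem.Str.strip (PySem.Str.replace st.2 "\n" " ")], t)

def pvGetText (b : List (String × String)) : String := (PySem.Dict.mk b).getD "original_text" ""

def pvFin (t : String) : String := PySem.Str.strip (PySem.Str.replace t "\n" " ")

-- generic: a range-indexed fold over a list is the fold over the list
theorem pv_rangeFold {α σ : Type} (g : σ → α → σ) (d : α) :
    ∀ (ys : List α) (st : σ),
      (List.range ys.length).foldl (fun s j => g s (ys.getD j d)) st = ys.foldl g st := by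
  intro ys
  induction ys with
  | nil => intro st; simp
  | cons y ys ih =>
    intro st
    rw [List.length_cons, List.range_succ_eq_map]
    simp only [List.foldl_cons, List.foldl_map, List.getD_cons_zero, List.getD_cons_succ]
    exact ih (g st y)

-- A's pyRange look-ahead loop equals a plain fold of pvStepT over the tail's texts
theorem pv_loopA_eq (b : List (String × String)) (rest : List (List (String × String)))
    (st : List String × String) :
    (PySem.List.pyRange 0 (PySem.List.len (b :: rest) - 1) 1).foldl
      (fun (st : List String × String) (i : Int) =>
        let cleaned := PySem.Str.strip st.2
        if PySem.Str.endswith cleaned "-" then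
          (st.1,
           PySem.Str.slice cleaned none (some (-1)) ++
             (PySem.Dict.mk (PySem.List.pyGetD (b :: rest) (i + 1) [])).getD "original_text" "")
        else
          (st.1 ++ [PySem.Str.strip (PySem.Str.replace st.2 "\n" " ")],
           (PySem.Dict.mk (PySem.List.pyGetD (b :: rest) (i + 1) [])).getD "original_text" ""))
      st
      = (rest.map pvGetText).foldl pvStepT st := by
  have hlen : PySem.List.len (b :: rest) - 1 = (rest.length : Int) := by
    simp [PySem.List.len_eq]
  rw [hlen, PySem.List.pyRange_one, List.foldl_map, List.foldl_map]
  have hcast : ∀ (k : Nat), ((0 : Int) + (k : Int) + 1) = ((k + 1 : Nat) : Int) := by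
    intro k; push_cast; ring
  have hbody : (fun (st : List String × String) (k : Nat) =>
      let cleaned := PySem.Str.strip st.2
      if PySem.Str.endswith cleaned "-" then
        (st.1,
         PySem.Str.slice cleaned none (some (-1)) ++
           (PySem.Dict.mk (PySem.List.pyGetD (b :: rest) ((0 : Int) + (k : Int) + 1) [])).getD "original_text" "")
      else
        (st.1 ++ [PySem.Str.strip (PySem.Str.replace st.2 "\n" " ")],
         (PySem.Dict.mk (PySem.List.pyGetD (b :: rest) ((0 : Int) + (k : Int) + 1) [])).getD "original_text" ""))
      = (fun (st : List String × String) (k : Nat) => pvStepT st (pvGetText (rest.getD k []))) := by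
    funext st k
    rw [hcast k, PySem.List.pyGetD_natCast, List.getD_cons_succ]
    rfl
  have hn : ((rest.length : Int) - 0).toNat = rest.length := by omega
  rw [hn, hbody, pv_rangeFold (fun st k => pvStepT st (pvGetText k)) []]

-- main correspondence: A's linear fold, finalized and filtered, equals B's grouping loop
theorem pv_main :
    ∀ (ts : List String) (cur : String) (acc : List String),
      (((ts.foldl pvStepT (acc, cur)).1 ++ [pvFin (ts.foldl pvStepT (acc, cur)).2]).filter
          (fun t => t != "")).map (fun t => [("original_text", t)])
        = (acc.filter (fun t => t != "")).map (fun t => [("original_text", t)]) ++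
            pvEmitGroups (cur :: ts) := by
  intro ts
  induction ts with
  | nil =>
    intro cur acc
    have hE : pvEmitGroups [cur] =
        if pvFin cur ≠ "" then [[("original_text", pvFin cur)]] else [] := by
      rw [pvEmitGroups, pvTakeGroup]
      simp [pvFin, pvEmitGroups]
    rw [List.foldl_nil, List.filter_append, List.map_append, hE]
    by_cases hf : pvFin cur = ""
    · simp [List.filter, hf]
    · have hb : (pvFin cur != "") = true := by simp [hf]
      simp [List.filter, hb, hf]
  | cons t rest ih =>
    intro cur acc
    rw [List.foldl_cons]
    by_cases h : PySem.Chars.endswith (PySem.Chars.strip cur.toList) ['-'] = true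
    · have hstep : pvStepT (acc, cur) t =
          (acc, PySem.Str.slice (PySem.Str.strip cur) none (some (-1)) ++ t) := by
        unfold pvStepT; simp [h]
      have htg : pvTakeGroup cur (t :: rest) =
          pvTakeGroup (PySem.Str.slice (PySem.Str.strip cur) none (some (-1)) ++ t) rest := by
        rw [pvTakeGroup]; simp [h]
      have hE : pvEmitGroups (cur :: t :: rest) =
          pvEmitGroups ((PySem.Str.slice (PySem.Str.strip cur) none (some (-1)) ++ t) :: rest) := by
        conv_lhs => rw [pvEmitGroups]
        conv_rhs => rw [pvEmitGroups]
        rw [htg]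
      rw [hstep, ih, hE]
    · have hstep : pvStepT (acc, cur) t = (acc ++ [pvFin cur], t) := by
        unfold pvStepT pvFin; simp [h]
      have htg : pvTakeGroup cur (t :: rest) = (cur, t :: rest) := by
        rw [pvTakeGroup]; simp [h]
      have hE : pvEmitGroups (cur :: t :: rest) =
          (if pvFin cur ≠ "" then [[("original_text", pvFin cur)]] else []) ++
            pvEmitGroups (t :: rest) := by
        conv_lhs => rw [pvEmitGroups]
        rw [htg]
        rfl
      rw [hstep, ih, hE, List.filter_append, List.map_append, List.append_assoc]
      by_cases hf : pvFin cur = ""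
      · simp [List.filter, hf]
      · have hb : (pvFin cur != "") = true := by simp [hf]
        simp [List.filter, hb, hf]

-- ===== VERDICT (by name: the statement is the Claim_ definition above) =====
theorem reconstruct_hyphenated_text_py_spec : Claim_equal_reconstruct_hyphenated_text_py := by
  intro blocks _
  unfold Spec_reconstruct_hyphenated_text_py reconstruct_hyphenated_text_py reconstruct_hyphenated_text_py_alt
  cases blocks with
  | nil => simp [pvEmitGroups]
  | cons b rest =>
    simp only [List.isEmpty_cons, if_neg Bool.false_ne_true]
    have h0 : (PySem.Dict.mk (PySem.List.pyGetD (b :: rest) 0 [])).getD "original_text" ""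
        = pvGetText b := by
      rw [PySem.List.pyGetD_zero_cons]; rfl
    rw [h0, pv_loopA_eq]
    have := pv_main (rest.map pvGetText) (pvGetText b) []
    simp only [List.filter_nil, List.map_nil, List.nil_append] at this
    simpa [pvFin] using this
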